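-- pv_equiv track=rewrite | github.com/toren-h/star-wars | star_wars.py | scan_entities
-- ===== SOURCE A (Python) =====
-- TILE = 40
--
-- def scan_entities(grid, ROWS, COLS):
--     start=None; goal=None; turrets=[]; siths=[]
--     for r in range(ROWS):
--         for c in range(COLS):
--             ch=grid[r][c]
--             if ch=='P' and start is None: start=(c*TILE, r*TILE)
--             elif ch=='G' and goal is None: goal=(c*TILE, r*TILE)
--             elif ch=='^': turrets.append((r,c))
--             elif ch=='S': siths.append((r,c))
--     if start is None: start=(TILE,TILE)
--     if goal  is None: goal=((COLS-2)*TILE,(ROWS-3)*TILE)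
--     return start,goal,turrets,siths
-- ===== SOURCE B (Python) =====
-- TILE = 40
--
-- def scan_entities(grid, ROWS, COLS):
--     # Four separate row-major passes instead of one combined stateful loop.
--     start = next(((c * TILE, r * TILE)
--                   for r in range(ROWS) for c in range(COLS)
--                   if grid[r][c] == 'P'), (TILE, TILE))
--     goal = next(((c * TILE, r * TILE)
--                  for r in range(ROWS) for c in range(COLS)
--                  if grid[r][c] == 'G'), ((COLS - 2) * TILE, (ROWS - 3) * TILE))
--     turrets = [(r, c) for r in range(ROWS) for c in range(COLS) if grid[r][c] == '^']
--     siths = [(r, c) for r in range(ROWS) for c in range(COLS) if grid[r][c] == 'S']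
--     return start, goal, turrets, siths
-- ===== Notes on version B (the rewrite author's own statement) =====
-- stated objective: idiomatic
-- what changed: Replaced the single stateful loop with its None-sentinels and elif chain by four independent row-major passes: two first-match generator searches with defaults for start/goal and two list comprehensions for turrets/siths.
import Mathlib
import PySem

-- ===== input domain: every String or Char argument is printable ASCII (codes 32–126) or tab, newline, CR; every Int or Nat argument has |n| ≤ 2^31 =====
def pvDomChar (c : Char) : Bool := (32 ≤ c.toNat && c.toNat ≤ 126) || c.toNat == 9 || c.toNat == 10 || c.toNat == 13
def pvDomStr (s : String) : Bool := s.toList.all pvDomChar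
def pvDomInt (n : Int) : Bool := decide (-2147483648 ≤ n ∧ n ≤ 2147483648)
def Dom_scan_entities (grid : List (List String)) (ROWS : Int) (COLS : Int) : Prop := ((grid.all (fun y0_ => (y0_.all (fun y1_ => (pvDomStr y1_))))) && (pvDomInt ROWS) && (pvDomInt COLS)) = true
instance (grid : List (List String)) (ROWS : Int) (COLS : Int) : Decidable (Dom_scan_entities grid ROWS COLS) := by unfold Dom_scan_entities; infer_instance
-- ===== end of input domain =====

-- ===== PORT A =====
-- B replaces A's single stateful loop by four independent row-major passes (idiomatic decomposition).

def pvStepA (grid : List (List String)) (r : Int)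
    (st : Option (Int × Int) × Option (Int × Int) × List (Int × Int) × List (Int × Int))
    (c : Int) :
    Option (Int × Int) × Option (Int × Int) × List (Int × Int) × List (Int × Int) :=
  let ch := PySem.List.pyGetD (PySem.List.pyGetD grid r []) c ""
  if ch = "P" ∧ st.1 = none then (some (c * 40, r * 40), st.2.1, st.2.2.1, st.2.2.2)
  else if ch = "G" ∧ st.2.1 = none then (st.1, some (c * 40, r * 40), st.2.2.1, st.2.2.2)
  else if ch = "^" then (st.1, st.2.1, st.2.2.1 ++ [(r, c)], st.2.2.2)
  else if ch = "S" then (st.1, st.2.1, st.2.2.1, st.2.2.2 ++ [(r, c)])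
  else st

def scan_entities (grid : List (List String)) (ROWS : Int) (COLS : Int) : (Int × Int) × (Int × Int) × (List (Int × Int)) × (List (Int × Int)) :=
  let s := (PySem.List.pyRange 0 ROWS 1).foldl
    (fun st r => (PySem.List.pyRange 0 COLS 1).foldl (pvStepA grid r) st)
    ((none, none, [], []) :
      Option (Int × Int) × Option (Int × Int) × List (Int × Int) × List (Int × Int))
  (s.1.getD (40, 40), s.2.1.getD ((COLS - 2) * 40, (ROWS - 3) * 40), s.2.2.1, s.2.2.2)

-- ===== PORT B =====
def pvCell (grid : List (List String)) (r c : Int) : String :=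
  PySem.List.pyGetD (PySem.List.pyGetD grid r []) c ""

def pvCells (ROWS COLS : Int) : List (Int × Int) :=
  (PySem.List.pyRange 0 ROWS 1).flatMap
    (fun r => (PySem.List.pyRange 0 COLS 1).map (fun c => (r, c)))

def scan_entities_alt (grid : List (List String)) (ROWS : Int) (COLS : Int) : (Int × Int) × (Int × Int) × (List (Int × Int)) × (List (Int × Int)) :=
  let cells := pvCells ROWS COLS
  let start := (cells.findSome? (fun p =>
      if pvCell grid p.1 p.2 = "P" then some (p.2 * 40, p.1 * 40) else none)).getD (40, 40)
  let goal := (cells.findSome? (fun p =>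
      if pvCell grid p.1 p.2 = "G" then some (p.2 * 40, p.1 * 40) else none)).getD
      ((COLS - 2) * 40, (ROWS - 3) * 40)
  let turrets := cells.filter (fun p => pvCell grid p.1 p.2 = "^")
  let siths := cells.filter (fun p => pvCell grid p.1 p.2 = "S")
  (start, goal, turrets, siths)

-- ===== PRECONDITION & SPEC =====
-- Pre_ excludes exactly the ragged/short grids on which Python's grid[r][c] raises IndexError.
def Pre_scan_entities (grid : List (List String)) (ROWS : Int) (COLS : Int) : Prop :=
  COLS ≤ 0 ∨ (ROWS ≤ (grid.length : Int) ∧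
    ∀ row ∈ grid.take ROWS.toNat, COLS ≤ (row.length : Int))
instance (grid : List (List String)) (ROWS : Int) (COLS : Int) : Decidable (Pre_scan_entities grid ROWS COLS) := by unfold Pre_scan_entities; infer_instance

def pvWitness_scan_entities : List (List String) × Int × Int :=
  ([["P", "."], [".", "G"], ["^", "S"]], 3, 2)

def Spec_scan_entities (grid : List (List String)) (ROWS : Int) (COLS : Int) (out : (Int × Int) × (Int × Int) × (List (Int × Int)) × (List (Int × Int))) : Prop := out = scan_entities_alt grid ROWS COLS
instance (grid : List (List String)) (ROWS : Int) (COLS : Int) (out : (Int × Int) × (Int × Int) × (List (Int × Int)) × (List (Int × Int))) : Decidable (Spec_scan_entities grid ROWS COLS out) := by unfold Spec_scan_entities; infer_instance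

-- ===== CLAIM (what is proved, stated in full; the proofs are below) =====
def Claim_equal_scan_entities : Prop := ∀ (grid : List (List String)) (ROWS : Int) (COLS : Int), Dom_scan_entities grid ROWS COLS → Pre_scan_entities grid ROWS COLS → Spec_scan_entities grid ROWS COLS (scan_entities grid ROWS COLS)

-- ===== LEMMAS AND PROOFS =====

-- The combined loop over any cell list equals the four independent passes.
set_option maxHeartbeats 1600000 in
theorem pvLoop_eq (grid : List (List String)) (L : List (Int × Int))
    (st gl : Option (Int × Int)) (ts ss : List (Int × Int)) :
    L.foldl (fun s p => pvStepA grid p.1 s p.2) (st, gl, ts, ss) =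
      (st.or (L.findSome? (fun p =>
          if pvCell grid p.1 p.2 = "P" then some (p.2 * 40, p.1 * 40) else none)),
       gl.or (L.findSome? (fun p =>
          if pvCell grid p.1 p.2 = "G" then some (p.2 * 40, p.1 * 40) else none)),
       ts ++ L.filter (fun p => pvCell grid p.1 p.2 = "^"),
       ss ++ L.filter (fun p => pvCell grid p.1 p.2 = "S")) := by
  induction L generalizing st gl ts ss with
  | nil => simp
  | cons p rest ih =>
    simp only [pvStepA] at ih ⊢
    simp only [List.foldl_cons, List.findSome?_cons, List.filter_cons]
    by_cases hP : PySem.List.pyGetD (PySem.List.pyGetD grid p.1 []) p.2 "" = "P" <;>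
      by_cases hG : PySem.List.pyGetD (PySem.List.pyGetD grid p.1 []) p.2 "" = "G" <;>
      by_cases hT : PySem.List.pyGetD (PySem.List.pyGetD grid p.1 []) p.2 "" = "^" <;>
      by_cases hS : PySem.List.pyGetD (PySem.List.pyGetD grid p.1 []) p.2 "" = "S" <;>
      cases st <;> cases gl <;>
      simp_all [pvCell, Option.or]

theorem pvFoldl_flatMap_cells (grid : List (List String)) (ROWS COLS : Int)
    (init : Option (Int × Int) × Option (Int × Int) × List (Int × Int) × List (Int × Int)) :
    (PySem.List.pyRange 0 ROWS 1).foldl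
      (fun st r => (PySem.List.pyRange 0 COLS 1).foldl (pvStepA grid r) st) init =
    (pvCells ROWS COLS).foldl (fun s p => pvStepA grid p.1 s p.2) init := by
  unfold pvCells
  rw [List.foldl_flatMap]
  simp only [List.foldl_map]

-- ===== VERDICT (by name: the statement is the Claim_ definition above) =====
theorem scan_entities_spec : Claim_equal_scan_entities := by
  intro grid ROWS COLS _ _
  unfold Spec_scan_entities scan_entities scan_entities_alt
  rw [pvFoldl_flatMap_cells, pvLoop_eq]
  simp
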